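-- pv_equiv track=rewrite | github.com/Iftikhar-hasan12/University-CSE-Journey | 3rd-year/Data-Communication/Exercise/Lab_manual_03/NRZ_I.py | ToEncoded
-- ===== SOURCE A (Python) =====
-- def ToEncoded(data):
--     result = []
--     signal = []
--     level =1
--     for i in data:
--         if i=='1':
--             level = -level
--         signal.append(level)
--         if level==1:
--             result.append(1)
--         else:
--             result.append(0)
--     return result, signal
-- ===== SOURCE B (Python) =====
-- def ToEncoded(data):
--     # Run-length construction: split the string on '1'. All characters of the
--     # k-th segment (and the '1' separator that precedes it, for k > 0) share
--     # the same level, determined only by the parity of k.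
--     res = []
--     sig = []
--     k = 0
--     for seg in data.split('1'):
--         if k % 2 == 0:
--             r, s = 1, 1
--         else:
--             r, s = 0, -1
--         n = len(seg) + (1 if k != 0 else 0)
--         res.extend([r] * n)
--         sig.extend([s] * n)
--         k += 1
--     return res, sig
-- ===== Notes on version B (the rewrite author's own statement) =====
-- stated objective: alternative
-- what changed: Instead of A's per-character level-flip-and-branch loop, B splits the string on '1' and emits whole constant run-length blocks per segment, each segment's level determined solely by the segment index parity.
import Mathlib
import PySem

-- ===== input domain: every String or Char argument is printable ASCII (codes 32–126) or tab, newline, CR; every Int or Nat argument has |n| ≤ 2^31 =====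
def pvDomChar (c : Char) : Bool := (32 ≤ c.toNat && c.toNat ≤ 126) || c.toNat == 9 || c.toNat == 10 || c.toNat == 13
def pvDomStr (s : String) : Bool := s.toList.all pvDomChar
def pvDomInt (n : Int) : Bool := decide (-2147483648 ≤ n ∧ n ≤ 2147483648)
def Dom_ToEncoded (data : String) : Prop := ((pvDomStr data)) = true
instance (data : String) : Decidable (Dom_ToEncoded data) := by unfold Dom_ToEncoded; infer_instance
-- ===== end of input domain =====

-- B replaces A's per-character level-flip loop by splitting the string on '1' and emitting constant run-length blocks per segment (alternative decomposition, same cost).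


-- ===== PORT A =====
-- loop body of A: state (result, signal, level)
def pvStepA (st : List Int × List Int × Int) (i : Char) : List Int × List Int × Int :=
  let level := if i = '1' then -st.2.2 else st.2.2
  (st.1 ++ [if level = 1 then (1 : Int) else 0], st.2.1 ++ [level], level)

def ToEncoded (data : String) : List Int × List Int :=
  let st := data.toList.foldl pvStepA ([], [], 1)
  (st.1, st.2.1)

-- ===== PORT B =====
-- loop body of B: state (result, signal, k); per segment it appends a constant
-- block of length len(seg) (+1 for the '1' separator when k ≠ 0)
def pvStepB (st : List Int × List Int × Nat) (seg : List Char) : List Int × List Int × Nat :=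
  let k := st.2.2
  let r : Int := if k % 2 = 0 then 1 else 0
  let s : Int := if k % 2 = 0 then 1 else -1
  let n := seg.length + (if k ≠ 0 then 1 else 0)
  (st.1 ++ List.replicate n r, st.2.1 ++ List.replicate n s, k + 1)

def ToEncoded_alt (data : String) : List Int × List Int :=
  let st := (PySem.Chars.splitOn data.toList ['1']).foldl pvStepB ([], [], 0)
  (st.1, st.2.1)

-- ===== PRECONDITION & SPEC =====
def Spec_ToEncoded (data : String) (out : List Int × List Int) : Prop := out = ToEncoded_alt data
instance (data : String) (out : List Int × List Int) : Decidable (Spec_ToEncoded data out) := by unfold Spec_ToEncoded; infer_instance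

-- ===== CLAIM =====
def Claim_equal_ToEncoded : Prop := ∀ (data : String), Dom_ToEncoded data → Spec_ToEncoded data (ToEncoded data)

-- ===== LEMMAS AND PROOFS =====
-- a direct (non-accumulator) version of Python's split on the one-char separator '1'
def pvSplit1 : List Char → List (List Char)
  | [] => [[]]
  | c :: r => if c = '1' then [] :: pvSplit1 r else (pvSplit1 r).modifyHead (c :: ·)

lemma pvSplit1_ne_nil (s : List Char) : pvSplit1 s ≠ [] := by
  cases s with
  | nil => simp [pvSplit1]
  | cons c r =>
      simp only [pvSplit1]
      split
      · simp
      · cases h : pvSplit1 r with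
        | nil => exact absurd h (pvSplit1_ne_nil r)
        | cons a t => simp

lemma pv_go_spec (fuel : Nat) (s cur : List Char) (acc : List (List Char))
    (hf : s.length ≤ fuel) :
    PySem.Chars.splitOn.go ['1'] fuel s cur acc
      = acc.reverse ++ (pvSplit1 s).modifyHead (cur.reverse ++ ·) := by
  induction fuel generalizing s cur acc with
  | zero =>
      cases s with
      | nil =>
          unfold PySem.Chars.splitOn.go
          simp [pvSplit1]
      | cons a t => simp at hf
  | succ f ih =>
      cases s with
      | nil =>
          unfold PySem.Chars.splitOn.go
          simp [pvSplit1]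
      | cons c rest =>
          unfold PySem.Chars.splitOn.go
          simp only [List.length_cons] at hf
          by_cases hc : c = '1'
          · subst hc
            rw [if_pos (by simp [List.isPrefixOf_cons₂])]
            rw [show List.drop ['1'].length ('1' :: rest) = rest from rfl]
            rw [ih rest [] (cur.reverse :: acc) (by omega)]
            simp only [pvSplit1, if_pos rfl, List.reverse_cons, List.reverse_nil]
            cases h : pvSplit1 rest with
            | nil => exact absurd h (pvSplit1_ne_nil rest)
            | cons a t => simp
          · rw [if_neg (by
              simp only [List.isPrefixOf_cons₂, List.isPrefixOf_nil_left,
                Bool.and_true, beq_iff_eq]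
              exact fun h => hc h.symm)]
            rw [ih rest (c :: cur) acc (by omega)]
            simp only [pvSplit1, if_neg hc, List.reverse_cons]
            cases h : pvSplit1 rest with
            | nil => exact absurd h (pvSplit1_ne_nil rest)
            | cons a t => simp

lemma pv_splitOn_eq (s : List Char) : PySem.Chars.splitOn s ['1'] = pvSplit1 s := by
  show PySem.Chars.splitOn.go ['1'] (s.length + 1) s [] [] = _
  rw [pv_go_spec (s.length + 1) s [] [] (by omega)]
  cases h : pvSplit1 s with
  | nil => exact absurd h (pvSplit1_ne_nil s)
  | cons a t => simp

-- the sequence of levels A produces, its 0/1 rendering, and the level after k flips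
def pvLevels : List Char → Int → List Int
  | [], _ => []
  | c :: r, lv =>
      let lv' := if c = '1' then -lv else lv
      lv' :: pvLevels r lv'

def pvLast : List Char → Int → Int
  | [], lv => lv
  | c :: r, lv => pvLast r (if c = '1' then -lv else lv)

def pvToR (v : Int) : Int := if v = 1 then 1 else 0

def pvLv (k : Nat) : Int := if k % 2 = 0 then 1 else -1

lemma pv_foldA (l : List Char) (res sig : List Int) (lv : Int) :
    l.foldl pvStepA (res, sig, lv)
      = (res ++ (pvLevels l lv).map pvToR, sig ++ pvLevels l lv, pvLast l lv) := by
  induction l generalizing res sig lv with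
  | nil => simp [pvLevels, pvLast]
  | cons c r ih =>
      simp only [List.foldl_cons, pvStepA, pvLevels, pvLast]
      rw [ih]
      simp [pvToR]

lemma pv_lv_succ (k : Nat) : pvLv (k + 1) = -pvLv k := by
  unfold pvLv
  rcases Nat.even_or_odd k with h | h <;> simp [Nat.even_iff, Nat.odd_iff] at h <;>
    simp [h] <;> omega

lemma pv_toR_lv (k : Nat) : pvToR (pvLv k) = if k % 2 = 0 then 1 else 0 := by
  unfold pvToR pvLv; split <;> simp

-- one fold step on a segment with its first char c ≠ '1' is the same step on the
-- shorter segment, with one copy of the block value absorbed into the accumulators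
lemma pv_step_absorb (res sig : List Int) (k : Nat) (c : Char) (a : List Char) :
    pvStepB (res, sig, k) (c :: a)
      = pvStepB (res ++ [if k % 2 = 0 then 1 else 0],
                 sig ++ [pvLv k], k) a := by
  simp only [pvStepB, List.length_cons, pvLv]
  have h : (a.length + 1 + (if k ≠ 0 then 1 else 0))
      = (a.length + (if k ≠ 0 then 1 else 0)) + 1 := by omega
  rw [h, List.replicate_succ, List.replicate_succ]
  simp only [List.append_assoc, List.singleton_append]

-- block lemma for k > 0: the fold over pvSplit1 s emits one entry for the
-- preceding '1' separator, then exactly A's level sequence for s at level pvLv k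
lemma pv_foldB_pos (s : List Char) (k : Nat) (res sig : List Int) (hk : k ≠ 0) :
    (pvSplit1 s).foldl pvStepB (res, sig, k)
      = (res ++ pvToR (pvLv k) :: ((pvLevels s (pvLv k)).map pvToR),
         sig ++ pvLv k :: pvLevels s (pvLv k),
         k + (pvSplit1 s).length) := by
  induction s generalizing k res sig with
  | nil =>
      simp only [pvSplit1, List.foldl_cons, List.foldl_nil, pvStepB,
        List.length_nil, if_pos hk, Nat.zero_add, pvLevels, List.length_cons,
        List.length_nil, List.replicate_one]
      rw [pv_toR_lv]
      simp [pvLv]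
  | cons c r ih =>
      by_cases hc : c = '1'
      · subst hc
        simp only [pvSplit1, reduceIte, List.foldl_cons]
        have hstep : pvStepB (res, sig, k) []
            = (res ++ [pvToR (pvLv k)], sig ++ [pvLv k], k + 1) := by
          simp only [pvStepB, List.length_nil, if_pos hk, Nat.zero_add,
            List.replicate_one]
          rw [pv_toR_lv]
          simp [pvLv]
        rw [hstep, ih (k + 1) _ _ (by omega)]
        have hlev : pvLevels ('1' :: r) (pvLv k)
            = pvLv (k + 1) :: pvLevels r (pvLv (k + 1)) := by
          simp [pvLevels, pv_lv_succ]
        rw [hlev]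
        simp only [Prod.mk.injEq, List.length_cons, List.append_assoc,
          List.cons_append, List.map_cons, List.singleton_append]
        refine ⟨?_, ?_, ?_⟩ <;> first | rfl | trivial | omega
      · simp only [pvSplit1, if_neg hc]
        cases h : pvSplit1 r with
        | nil => exact absurd h (pvSplit1_ne_nil r)
        | cons a t =>
            simp only [List.modifyHead, List.foldl_cons]
            rw [pv_step_absorb]
            rw [show ((if k % 2 = 0 then (1 : Int) else 0)) = pvToR (pvLv k) from
              (pv_toR_lv k).symm]
            have := ih k (res ++ [pvToR (pvLv k)]) (sig ++ [pvLv k]) hk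
            rw [h] at this
            simp only [List.foldl_cons] at this
            rw [this]
            have hlev : pvLevels (c :: r) (pvLv k)
                = pvLv k :: pvLevels r (pvLv k) := by
              simp [pvLevels, hc]
            rw [hlev]
            simp only [Prod.mk.injEq, List.length_cons, List.append_assoc,
              List.cons_append, List.map_cons, List.singleton_append]
            refine ⟨?_, ?_, ?_⟩ <;> first | rfl | trivial | omega

-- top-level block lemma: starting at k = 0 there is no separator entry
lemma pv_foldB_zero (s : List Char) (res sig : List Int) :
    (pvSplit1 s).foldl pvStepB (res, sig, 0)
      = (res ++ (pvLevels s 1).map pvToR,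
         sig ++ pvLevels s 1,
         (pvSplit1 s).length) := by
  induction s generalizing res sig with
  | nil =>
      simp [pvSplit1, pvStepB, pvLevels]
  | cons c r ih =>
      by_cases hc : c = '1'
      · subst hc
        simp only [pvSplit1, reduceIte, List.foldl_cons]
        have hstep : pvStepB (res, sig, 0) [] = (res, sig, 1) := by
          simp [pvStepB]
        rw [hstep, pv_foldB_pos r 1 res sig (by omega)]
        have hlev : pvLevels ('1' :: r) 1 = (-1) :: pvLevels r (-1) := by
          simp [pvLevels]
        have hlv : pvLv 1 = -1 := by simp [pvLv]
        rw [hlev, hlv]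
        simp only [Prod.mk.injEq, List.length_cons]
        refine ⟨?_, ?_, ?_⟩ <;> first | rfl | trivial | omega
      · simp only [pvSplit1, if_neg hc]
        cases h : pvSplit1 r with
        | nil => exact absurd h (pvSplit1_ne_nil r)
        | cons a t =>
            simp only [List.modifyHead, List.foldl_cons]
            rw [pv_step_absorb,
              show (if 0 % 2 = 0 then (1 : Int) else 0) = 1 from rfl,
              show pvLv 0 = 1 from rfl]
            have := ih (res ++ [(1 : Int)]) (sig ++ [(1 : Int)])
            rw [h] at this
            simp only [List.foldl_cons] at this
            rw [this]
            have hlev : pvLevels (c :: r) 1 = 1 :: pvLevels r 1 := by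
              simp [pvLevels, hc]
            rw [hlev]
            simp only [Prod.mk.injEq, List.length_cons, List.append_assoc,
              List.cons_append, List.map_cons, List.singleton_append]
            refine ⟨?_, ?_, ?_⟩ <;> first | rfl | trivial | omega

-- ===== VERDICT =====
theorem ToEncoded_spec : Claim_equal_ToEncoded := by
  intro data _
  unfold Spec_ToEncoded ToEncoded ToEncoded_alt
  rw [pv_splitOn_eq]
  rw [pv_foldA data.toList [] [] 1, pv_foldB_zero data.toList [] []]
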